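-- pv_equiv track=rewrite | github.com/codeternalx123/bitelab | flaskbackend/app/ai_nutrition/microservices/meal_planning_service_phase1.py | _generate_substitution_map
-- ===== SOURCE A (Python) =====
-- from typing import Dict, List, Optional, Set, Tuple, Any, Callable
--
-- def _generate_substitution_map(ingredients: List[Dict]) -> Dict[str, List[Dict]]:
--     """Generate substitution suggestions for each ingredient"""
--
--     substitutions = {}
--
--     for ing in ingredients:
--         name = ing["name"].lower()
--
--         # Common substitutions
--         if "chicken breast" in name:
--             substitutions[ing["name"]] = [
--                 {"name": "Turkey breast", "reason": "Similar protein, often cheaper"},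
--                 {"name": "Tofu", "reason": "Plant-based alternative"},
--             ]
--
--         elif "salmon" in name:
--             substitutions[ing["name"]] = [
--                 {"name": "Canned salmon", "reason": "Much cheaper, same omega-3"},
--                 {"name": "Sardines", "reason": "Budget-friendly, high omega-3"},
--             ]
--
--         elif "quinoa" in name:
--             substitutions[ing["name"]] = [
--                 {"name": "Brown rice", "reason": "Cheaper, similar nutrition"},
--                 {"name": "Bulgur", "reason": "Budget-friendly whole grain"},
--             ]
--
--     return substitutions
-- ===== SOURCE B (Python) =====
-- KEYWORDS = ["chicken breast", "salmon", "quinoa"]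
-- SUBS = [
--     [
--         {"name": "Turkey breast", "reason": "Similar protein, often cheaper"},
--         {"name": "Tofu", "reason": "Plant-based alternative"},
--     ],
--     [
--         {"name": "Canned salmon", "reason": "Much cheaper, same omega-3"},
--         {"name": "Sardines", "reason": "Budget-friendly, high omega-3"},
--     ],
--     [
--         {"name": "Brown rice", "reason": "Cheaper, similar nutrition"},
--         {"name": "Bulgur", "reason": "Budget-friendly whole grain"},
--     ],
-- ]
--
--
-- def _generate_substitution_map(ingredients):
--     # Rule-major staged passes: one sweep per rule marks the still-unmatched
--     # ingredients whose lowered name contains the keyword (so earlier rules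
--     # keep priority), then a final assembly pass builds the result dict in
--     # ingredient order.
--     matched = [None] * len(ingredients)
--     for kw, subs in zip(KEYWORDS, SUBS):
--         matched = [
--             subs if m is None and kw in ing["name"].lower() else m
--             for ing, m in zip(ingredients, matched)
--         ]
--     out = {}
--     for ing, m in zip(ingredients, matched):
--         if m is not None:
--             out[ing["name"]] = m
--     return out
-- ===== Notes on version B (the rewrite author's own statement) =====
-- stated objective: alternative
-- what changed: Replaces A's single ingredient-major loop with an inline if/elif chain by rule-major staged passes: one sweep per rule marks the still-unmatched ingredients whose lowered name contains the keyword (preserving rule priority), then a final assembly pass builds the result dict in ingredient order.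
import Mathlib
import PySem

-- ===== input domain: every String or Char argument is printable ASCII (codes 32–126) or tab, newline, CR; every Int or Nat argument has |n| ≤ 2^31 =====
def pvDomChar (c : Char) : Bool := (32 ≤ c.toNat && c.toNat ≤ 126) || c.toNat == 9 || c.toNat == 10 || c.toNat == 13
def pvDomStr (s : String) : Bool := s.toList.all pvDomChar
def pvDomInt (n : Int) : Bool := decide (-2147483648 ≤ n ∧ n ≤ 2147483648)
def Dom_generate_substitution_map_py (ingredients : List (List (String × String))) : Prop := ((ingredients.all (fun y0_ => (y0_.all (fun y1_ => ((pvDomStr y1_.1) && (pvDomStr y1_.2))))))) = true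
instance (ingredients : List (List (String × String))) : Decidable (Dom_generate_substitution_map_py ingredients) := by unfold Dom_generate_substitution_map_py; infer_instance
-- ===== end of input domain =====

-- B replaces A's single ingredient-major loop with an if/elif chain by rule-major staged
-- passes: one sweep per rule marks still-unmatched ingredients, then a final assembly pass
-- builds the dict (alternative decomposition; same cost). Pre_ excludes KeyError inputs.


-- ===== PORT A =====
-- literal port of A: one loop over the ingredients, if/elif chain with inline lists.
-- ing["name"]: KeyError (get? = none) is excluded by Pre_, so .getD "" is never taken there.
def generate_substitution_map_py (ingredients : List (List (String × String))) : List (String × List (List (String × String))) :=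
  (ingredients.foldl (fun substitutions ing =>
      let origName := ((PySem.Dict.mk ing).get? "name").getD ""
      let name := PySem.Str.lower origName
      if PySem.Str.isIn "chicken breast" name then
        substitutions.insert origName
          [[("name", "Turkey breast"), ("reason", "Similar protein, often cheaper")],
           [("name", "Tofu"), ("reason", "Plant-based alternative")]]
      else if PySem.Str.isIn "salmon" name then
        substitutions.insert origName
          [[("name", "Canned salmon"), ("reason", "Much cheaper, same omega-3")],
           [("name", "Sardines"), ("reason", "Budget-friendly, high omega-3")]]
      else if PySem.Str.isIn "quinoa" name then
        substitutions.insert origName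
          [[("name", "Brown rice"), ("reason", "Cheaper, similar nutrition")],
           [("name", "Bulgur"), ("reason", "Budget-friendly whole grain")]]
      else substitutions)
    PySem.Dict.empty).items

-- ===== PORT B =====
def pvKeywords : List String := ["chicken breast", "salmon", "quinoa"]

def pvSubs : List (List (List (String × String))) :=
  [[[("name", "Turkey breast"), ("reason", "Similar protein, often cheaper")],
    [("name", "Tofu"), ("reason", "Plant-based alternative")]],
   [[("name", "Canned salmon"), ("reason", "Much cheaper, same omega-3")],
    [("name", "Sardines"), ("reason", "Budget-friendly, high omega-3")]],
   [[("name", "Brown rice"), ("reason", "Cheaper, similar nutrition")],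
    [("name", "Bulgur"), ("reason", "Budget-friendly whole grain")]]]

-- one rule-major sweep: mark still-unmatched ingredients whose lowered name contains kw
def pvPass (kw : String) (subs : List (List (String × String)))
    (ingredients : List (List (String × String)))
    (matched : List (Option (List (List (String × String))))) :
    List (Option (List (List (String × String)))) :=
  (ingredients.zip matched).map (fun p =>
    if p.2.isNone && PySem.Str.isIn kw (PySem.Str.lower (((PySem.Dict.mk p.1).get? "name").getD "")) then
      some subs
    else p.2)

def generate_substitution_map_py_alt (ingredients : List (List (String × String))) : List (String × List (List (String × String))) :=
  let matched0 : List (Option (List (List (String × String)))) := ingredients.map (fun _ => none)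
  let matched := (pvKeywords.zip pvSubs).foldl (fun m r => pvPass r.1 r.2 ingredients m) matched0
  ((ingredients.zip matched).foldl (fun d p =>
      match p.2 with
      | some subs => d.insert (((PySem.Dict.mk p.1).get? "name").getD "") subs
      | none => d)
    PySem.Dict.empty).items

-- ===== PRECONDITION & SPEC =====
-- Pre_ excludes exactly the inputs on which Python A raises KeyError: some ingredient dict has no "name" key.
def Pre_generate_substitution_map_py (ingredients : List (List (String × String))) : Prop :=
  ∀ ing ∈ ingredients, "name" ∈ ing.map Prod.fst
instance (ingredients : List (List (String × String))) : Decidable (Pre_generate_substitution_map_py ingredients) := by unfold Pre_generate_substitution_map_py; infer_instance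

def pvWitness_generate_substitution_map_py : (List (List (String × String))) :=
  [[("name", "Salmon Fillet")], [("name", "beef")]]

def Spec_generate_substitution_map_py (ingredients : List (List (String × String))) (out : List (String × List (List (String × String)))) : Prop := out = generate_substitution_map_py_alt ingredients
instance (ingredients : List (List (String × String))) (out : List (String × List (List (String × String)))) : Decidable (Spec_generate_substitution_map_py ingredients out) := by unfold Spec_generate_substitution_map_py; infer_instance

-- ===== CLAIM (what is proved, stated in full; the proofs are below) =====
def Claim_equal_generate_substitution_map_py : Prop := ∀ (ingredients : List (List (String × String))), Dom_generate_substitution_map_py ingredients → Pre_generate_substitution_map_py ingredients → Spec_generate_substitution_map_py ingredients (generate_substitution_map_py ingredients)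

-- ===== LEMMAS AND PROOFS =====

theorem pvPass_cons (kw : String) (subs : List (List (String × String)))
    (ing : List (String × String)) (rest : List (List (String × String)))
    (m : Option (List (List (String × String)))) (ms : List (Option (List (List (String × String))))) :
    pvPass kw subs (ing :: rest) (m :: ms)
      = (if m.isNone && PySem.Str.isIn kw (PySem.Str.lower (((PySem.Dict.mk ing).get? "name").getD "")) then some subs else m)
        :: pvPass kw subs rest ms := by
  simp [pvPass]

-- the two folds agree: A's single if/elif pass = B's three staged passes + assembly
theorem pv_fold_eq (l : List (List (String × String))) (d : PySem.Dict String (List (List (String × String)))) :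
    l.foldl (fun substitutions ing =>
      let origName := ((PySem.Dict.mk ing).get? "name").getD ""
      let name := PySem.Str.lower origName
      if PySem.Str.isIn "chicken breast" name then
        substitutions.insert origName
          [[("name", "Turkey breast"), ("reason", "Similar protein, often cheaper")],
           [("name", "Tofu"), ("reason", "Plant-based alternative")]]
      else if PySem.Str.isIn "salmon" name then
        substitutions.insert origName
          [[("name", "Canned salmon"), ("reason", "Much cheaper, same omega-3")],
           [("name", "Sardines"), ("reason", "Budget-friendly, high omega-3")]]
      else if PySem.Str.isIn "quinoa" name then
        substitutions.insert origName
          [[("name", "Brown rice"), ("reason", "Cheaper, similar nutrition")],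
           [("name", "Bulgur"), ("reason", "Budget-friendly whole grain")]]
      else substitutions) d
    = (l.zip ((pvKeywords.zip pvSubs).foldl (fun m r => pvPass r.1 r.2 l m) (l.map (fun _ => none)))).foldl
        (fun d p =>
          match p.2 with
          | some subs => d.insert (((PySem.Dict.mk p.1).get? "name").getD "") subs
          | none => d) d := by
  induction l generalizing d with
  | nil => simp [pvKeywords, pvSubs, pvPass]
  | cons ing rest ih =>
    simp only [pvKeywords, pvSubs, List.zip_cons_cons, List.zip_nil_right, List.foldl_cons,
      List.foldl_nil, List.map_cons, pvPass_cons] at ih ⊢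
    rw [ih]
    congr 1
    split_ifs <;> simp_all

-- ===== VERDICT (by name: the statement is the Claim_ definition above) =====
theorem generate_substitution_map_py_spec : Claim_equal_generate_substitution_map_py := by
  intro ingredients _ _
  unfold Spec_generate_substitution_map_py generate_substitution_map_py generate_substitution_map_py_alt
  rw [pv_fold_eq]
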